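-- pv_equiv track=rewrite | github.com/need-singularity/sylvian-singularity | .shared/calc/topological_optics.py | beta0
-- ===== SOURCE A (Python) =====
-- class UnionFind:
--     def __init__(self, n):
--         self.parent = list(range(n))
--         self.rank = [0] * n
--         self.count = n
--
--     def find(self, x):
--         while self.parent[x] != x:
--             self.parent[x] = self.parent[self.parent[x]]
--             x = self.parent[x]
--         return x
--
--     def union(self, x, y):
--         rx, ry = self.find(x), self.find(y)
--         if rx == ry:
--             return
--         if self.rank[rx] < self.rank[ry]:
--             rx, ry = ry, rx
--         self.parent[ry] = rx
--         if self.rank[rx] == self.rank[ry]: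
--             self.rank[rx] += 1
--         self.count -= 1
--
-- def beta0(points, epsilon):
--     """Count connected components when edges connect points within epsilon."""
--     n = len(points)
--     if n == 0:
--         return 0
--     uf = UnionFind(n)
--     sorted_pts = sorted(range(n), key=lambda i: points[i])
--     for k in range(len(sorted_pts) - 1):
--         i = sorted_pts[k]
--         j = sorted_pts[k + 1]
--         if abs(points[j] - points[i]) <= epsilon:
--             uf.union(i, j)
--     return uf.count
-- ===== SOURCE B (Python) =====
-- def beta0(points, epsilon):
--     """Count connected components when edges connect points within epsilon."""
--     if not points:
--         return 0
--     pts = sorted(points)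
--     return 1 + sum(1 for k in range(len(pts) - 1) if pts[k + 1] - pts[k] > epsilon)
-- ===== Notes on version B (the rewrite author's own statement) =====
-- stated objective: simpler
-- what changed: Replaces the union-find over sorted indices by a direct scan of the sorted values counting gaps strictly greater than epsilon (components = gaps + 1); no union-find structure is built.
import Mathlib
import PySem

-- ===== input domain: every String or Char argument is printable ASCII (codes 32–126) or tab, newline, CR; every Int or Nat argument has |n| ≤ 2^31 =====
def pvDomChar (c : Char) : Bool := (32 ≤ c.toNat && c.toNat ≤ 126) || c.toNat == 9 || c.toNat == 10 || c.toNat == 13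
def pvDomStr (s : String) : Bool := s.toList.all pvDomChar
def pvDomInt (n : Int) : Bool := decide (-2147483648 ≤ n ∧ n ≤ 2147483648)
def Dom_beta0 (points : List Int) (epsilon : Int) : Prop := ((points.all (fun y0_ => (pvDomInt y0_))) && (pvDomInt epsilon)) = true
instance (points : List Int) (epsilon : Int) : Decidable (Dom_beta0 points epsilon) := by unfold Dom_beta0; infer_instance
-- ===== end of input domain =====

-- B replaces A's union-find over sorted indices by a direct gap count over the sorted values (simpler).


-- ===== PORT A =====
-- UnionFind.find with path compression.  Python's `while self.parent[x] != x` always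
-- terminates within `n` steps (the parent pointers form a forest over n nodes), so the
-- port carries fuel = size of the parent list; with that fuel it computes exactly what
-- Python computes.  All indices A ever uses are ints in 0..n-1 (they come from range(n)),
-- so Nat indexing with List.getD/List.set is exact here (no negative/out-of-range access).
def ufFind (fuel : Nat) (parent : List Nat) (x : Nat) : List Nat × Nat :=
  match fuel with
  | 0 => (parent, x)
  | fuel + 1 =>
    if parent.getD x x = x then (parent, x)
    else
      -- self.parent[x] = self.parent[self.parent[x]]; x = self.parent[x]
      let p := parent.getD x x
      let g := parent.getD p p
      ufFind fuel (parent.set x g) g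

-- UnionFind.union; state is (parent, rank, count)
def ufUnion (parent : List Nat) (rank : List Nat) (count : Int) (x y : Nat) :
    List Nat × List Nat × Int :=
  let f1 := ufFind parent.length parent x
  let parent1 := f1.1
  let rx := f1.2
  let f2 := ufFind parent1.length parent1 y
  let parent2 := f2.1
  let ry := f2.2
  if rx = ry then (parent2, rank, count)
  else
    let pr := if rank.getD rx 0 < rank.getD ry 0 then (ry, rx) else (rx, ry)
    let rx' := pr.1
    let ry' := pr.2
    let parent3 := parent2.set ry' rx'
    let rank' := if rank.getD rx' 0 = rank.getD ry' 0 then rank.set rx' (rank.getD rx' 0 + 1) else rank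
    (parent3, rank', count - 1)

def beta0 (points : List Int) (epsilon : Int) : Int :=
  let n := points.length
  if n = 0 then 0
  else
    -- sorted(range(n), key=lambda i: points[i]); indices kept as Nat (all in 0..n-1, exact)
    let s := PySem.List.sorted (List.range n) (fun i => points.getD i 0) false
    let st := (List.range (s.length - 1)).foldl
      (fun st k =>
        let i := s.getD k 0
        let j := s.getD (k + 1) 0
        if |points.getD j 0 - points.getD i 0| ≤ epsilon then
          ufUnion st.1 st.2.1 st.2.2 i j
        else st)
      (List.range n, List.replicate n 0, (n : Int))
    st.2.2

-- ===== PORT B =====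
def beta0_alt (points : List Int) (epsilon : Int) : Int :=
  if points = [] then 0
  else
    let pts := PySem.List.sorted points (fun x => x) false
    1 + ((List.range (pts.length - 1)).countP
          (fun k => decide (epsilon < pts.getD (k + 1) 0 - pts.getD k 0)) : Int)

-- ===== PRECONDITION & SPEC =====
def Spec_beta0 (points : List Int) (epsilon : Int) (out : Int) : Prop := out = beta0_alt points epsilon
instance (points : List Int) (epsilon : Int) (out : Int) : Decidable (Spec_beta0 points epsilon out) := by unfold Spec_beta0; infer_instance

-- ===== CLAIM (what is proved, stated in full; the proofs are below) =====
def Claim_equal_beta0 : Prop := ∀ (points : List Int) (epsilon : Int), Dom_beta0 points epsilon → Spec_beta0 points epsilon (beta0 points epsilon)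

-- ===== LEMMAS AND PROOFS =====

def NoPtr (parent : List Nat) (t : Nat) : Prop := ∀ y, y ≠ t → parent.getD y y ≠ t

theorem getD_set_cases (l : List Nat) (a b y : Nat) :
    (l.set a b).getD y y = if y = a ∧ a < l.length then b else l.getD y y := by
  by_cases hy : y = a
  · subst hy
    by_cases hl : y < l.length
    · simp [List.getD, List.getElem?_set, hl]
    · simp [List.getD, hl]
  · simp [List.getD, List.getElem?_set, hy, Ne.symm hy]

theorem ufFind_length (fuel : Nat) (parent : List Nat) (x : Nat) :
    (ufFind fuel parent x).1.length = parent.length := by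
  induction fuel generalizing parent x with
  | zero => rfl
  | succ fuel ih =>
    rw [ufFind]
    split
    · rfl
    · rw [ih, List.length_set]

theorem ufFind_root (fuel : Nat) (parent : List Nat) (x : Nat) (h0 : 0 < fuel)
    (hx : parent.getD x x = x) : ufFind fuel parent x = (parent, x) := by
  match fuel with
  | fuel + 1 => rw [ufFind, if_pos hx]

theorem ufFind_avoid (t : Nat) (fuel : Nat) (parent : List Nat) (x : Nat)
    (hx : x ≠ t) (hn : NoPtr parent t) :
    (ufFind fuel parent x).2 ≠ t ∧ NoPtr (ufFind fuel parent x).1 t ∧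
      (ufFind fuel parent x).1.getD t t = parent.getD t t := by
  induction fuel generalizing parent x with
  | zero => exact ⟨hx, hn, rfl⟩
  | succ fuel ih =>
    rw [ufFind]
    split
    · exact ⟨hx, hn, rfl⟩
    · have hp : parent.getD x x ≠ t := hn x hx
      have hg : parent.getD (parent.getD x x) (parent.getD x x) ≠ t := hn _ hp
      have hn' : NoPtr (parent.set x (parent.getD (parent.getD x x) (parent.getD x x))) t := by
        intro y hy
        rw [getD_set_cases]
        split
        · exact hg
        · exact hn y hy
      have hgt : (parent.set x (parent.getD (parent.getD x x) (parent.getD x x))).getD t t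
          = parent.getD t t := by
        rw [getD_set_cases, if_neg (fun h => hx h.1.symm)]
      obtain ⟨h1, h2, h3⟩ := ih _ _ hg hn'
      exact ⟨h1, h2, h3.trans hgt⟩

theorem ufUnion_spec (parent rank : List Nat) (count : Int) (i j : Nat)
    (h0 : 0 < parent.length) (hij : i ≠ j)
    (hnj : NoPtr parent j) (hrj : parent.getD j j = j) :
    (ufUnion parent rank count i j).2.2 = count - 1 ∧
    (ufUnion parent rank count i j).1.length = parent.length ∧
    ∀ t, i ≠ t → j ≠ t → NoPtr parent t → parent.getD t t = t →
      NoPtr (ufUnion parent rank count i j).1 t ∧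
        (ufUnion parent rank count i j).1.getD t t = t := by
  obtain ⟨hrij, hnj1, hjj1⟩ := ufFind_avoid j parent.length parent i hij hnj
  have hlen1 : (ufFind parent.length parent i).1.length = parent.length :=
    ufFind_length parent.length parent i
  have hf2 : ufFind (ufFind parent.length parent i).1.length (ufFind parent.length parent i).1 j
      = ((ufFind parent.length parent i).1, j) :=
    ufFind_root _ _ _ (by rw [hlen1]; exact h0) (hjj1.trans hrj)
  simp only [ufUnion]
  rw [hf2]
  simp only [if_neg hrij]
  refine ⟨trivial, ?_, ?_⟩
  · split <;> simp [hlen1]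
  · intro t hit hjt hnt hrt
    obtain ⟨hrit, hnt1, htt1⟩ := ufFind_avoid t parent.length parent i hit hnt
    have hroot1 : (ufFind parent.length parent i).1.getD t t = t := htt1.trans hrt
    split
    case isTrue h =>
      refine ⟨?_, ?_⟩
      · intro y hy
        rw [getD_set_cases]
        split
        · exact hjt
        · exact hnt1 y hy
      · rw [getD_set_cases, if_neg (fun hc => hrit hc.1.symm)]
        exact hroot1
    case isFalse h =>
      refine ⟨?_, ?_⟩
      · intro y hy
        rw [getD_set_cases]
        split
        · exact hrit
        · exact hnt1 y hy
      · rw [getD_set_cases, if_neg (fun hc => hjt hc.1.symm)]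
        exact hroot1

theorem beta0_loop (points : List Int) (epsilon : Int) (n : Nat) (s : List Nat)
    (hn : 0 < n) (hsl : s.length = n)
    (hinj : ∀ a b, a < n → b < n → a ≠ b → s.getD a 0 ≠ s.getD b 0) :
    ∀ m, m ≤ n - 1 →
      (let st := (List.range m).foldl
        (fun st k =>
          if |points.getD (s.getD (k + 1) 0) 0 - points.getD (s.getD k 0) 0| ≤ epsilon then
            ufUnion st.1 st.2.1 st.2.2 (s.getD k 0) (s.getD (k + 1) 0)
          else st)
        (List.range n, List.replicate n 0, (n : Int))
      st.1.length = n ∧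
      (∀ m', m < m' → m' < n →
        NoPtr st.1 (s.getD m' 0) ∧ st.1.getD (s.getD m' 0) (s.getD m' 0) = s.getD m' 0) ∧
      st.2.2 = (n : Int) - ((List.range m).countP
        (fun k => decide (|points.getD (s.getD (k + 1) 0) 0 - points.getD (s.getD k 0) 0| ≤ epsilon)) : Int)) := by
  intro m
  induction m with
  | zero =>
    intro _
    simp only [List.range_zero, List.foldl_nil]
    have hinit : ∀ y : Nat, (List.range n).getD y y = y := by
      intro y
      by_cases hy : y < n
      · rw [List.getD_eq_getElem _ _ (by simpa using hy)]
        simp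
      · rw [List.getD_eq_default _ _ (by simpa using hy)]
    refine ⟨by simp, ?_, by simp⟩
    intro m' _ _
    exact ⟨fun y hy => by rw [hinit y]; exact hy, hinit _⟩
  | succ m ih =>
    intro hm1
    have hm : m ≤ n - 1 := Nat.le_of_succ_le hm1
    have hmn : m + 1 < n := by omega
    obtain ⟨hlen, hgood, hcount⟩ := ih hm
    rw [List.range_succ, List.foldl_append, List.foldl_cons, List.foldl_nil]
    set st := (List.range m).foldl
        (fun st k =>
          if |points.getD (s.getD (k + 1) 0) 0 - points.getD (s.getD k 0) 0| ≤ epsilon then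
            ufUnion st.1 st.2.1 st.2.2 (s.getD k 0) (s.getD (k + 1) 0)
          else st)
        (List.range n, List.replicate n 0, (n : Int)) with hst
    by_cases hc : |points.getD (s.getD (m + 1) 0) 0 - points.getD (s.getD m 0) 0| ≤ epsilon
    · rw [if_pos hc]
      have hij : s.getD m 0 ≠ s.getD (m + 1) 0 := hinj m (m + 1) (by omega) hmn (by omega)
      obtain ⟨hgj, hrj⟩ := hgood (m + 1) (by omega) hmn
      obtain ⟨hu1, hu2, hu3⟩ := ufUnion_spec st.1 st.2.1 st.2.2 (s.getD m 0) (s.getD (m + 1) 0)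
        (by rw [hlen]; exact hn) hij hgj hrj
      refine ⟨by rw [hu2, hlen], ?_, ?_⟩
      · intro m' hm' hm'n
        exact hu3 (s.getD m' 0)
          (hinj m m' (by omega) hm'n (by omega))
          (hinj (m + 1) m' hmn hm'n (by omega))
          (hgood m' (by omega) hm'n).1 (hgood m' (by omega) hm'n).2
      · rw [hu1, hcount, List.countP_append]
        simp only [List.countP_cons, List.countP_nil, hc, decide_true, if_true]
        push_cast
        ring
    · rw [if_neg hc]
      refine ⟨hlen, ?_, ?_⟩
      · intro m' hm' hm'n
        exact hgood m' (by omega) hm'n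
      · rw [hcount, List.countP_append]
        simp only [List.countP_cons, List.countP_nil, hc, decide_false, if_false]
        push_cast
        ring

theorem beta0_ab (points : List Int) (epsilon : Int) :
    beta0 points epsilon = beta0_alt points epsilon := by
  by_cases hnil : points = []
  · subst hnil; rfl
  · have hn : 0 < points.length := List.length_pos_of_ne_nil hnil
    simp only [beta0, beta0_alt]
    rw [if_neg (by omega), if_neg hnil]
    set n := points.length with hnn
    set s := PySem.List.sorted (List.range n) (fun i => points.getD i 0) false with hs
    set ps := PySem.List.sorted points (fun x => x) false with hps
    have hsl : s.length = n := by rw [hs, PySem.List.length_sorted, List.length_range]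
    have hpsl : ps.length = n := by rw [hps, PySem.List.length_sorted]
    have hperm : s.Perm (List.range n) := PySem.List.sorted_perm _ _ _
    have hnd : s.Nodup := hperm.nodup_iff.mpr (List.nodup_range)
    have hinj : ∀ a b, a < n → b < n → a ≠ b → s.getD a 0 ≠ s.getD b 0 := by
      intro a b ha hb hab hEq
      rw [List.getD_eq_getElem _ _ (by omega : a < s.length),
        List.getD_eq_getElem _ _ (by omega : b < s.length)] at hEq
      exact hab ((List.Nodup.getElem_inj_iff hnd).mp hEq)
    -- A side: count = n - (# gaps ≤ epsilon)
    obtain ⟨-, -, hcount⟩ := beta0_loop points epsilon n s hn hsl hinj (n - 1) le_rfl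
    rw [hsl, hcount]
    -- bridge: the sorted values are the key-sorted indices mapped through points
    have hmapr : (List.range n).map (fun i => points.getD i 0) = points := by
      apply List.ext_getElem
      · simp [hnn]
      · intro i h1 h2
        simp [List.getElem?_eq_getElem h2]
    have hmap : ps = s.map (fun i => points.getD i 0) := by
      rw [hps]
      refine PySem.List.sorted_id_eq_of_perm_of_pairwise _ _ ?_ ?_
      · have hp2 := hperm.map (fun i => points.getD i 0)
        rw [hmapr] at hp2
        exact hp2
      · exact PySem.List.sorted_map_key_pairwise (List.range n) (fun i => points.getD i 0)
    have hpt : ∀ k, k < n → ps.getD k 0 = points.getD (s.getD k 0) 0 := by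
      intro k hk
      rw [hmap, List.getD_eq_getElem _ _ (by simp [hsl]; omega), List.getElem_map,
        List.getD_eq_getElem _ _ (by omega : k < s.length)]
    have hmono : ∀ k, k + 1 < n → ps.getD k 0 ≤ ps.getD (k + 1) 0 := by
      intro k hk
      have h1 : k < ps.length := by omega
      have h2 : k + 1 < ps.length := by omega
      rw [List.getD_eq_getElem _ _ h1, List.getD_eq_getElem _ _ h2]
      have hpw : ps.Pairwise (fun (a b : Int) => a ≤ b) :=
        PySem.List.sorted_pairwise points (fun x => x)
      exact List.pairwise_iff_getElem.mp hpw k (k + 1) h1 h2 (by omega)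
    -- countP bridge
    have hcongr : (List.range (ps.length - 1)).countP
        (fun k => decide (epsilon < ps.getD (k + 1) 0 - ps.getD k 0))
        = (List.range (n - 1)).countP
        (fun k => !(decide (|points.getD (s.getD (k + 1) 0) 0 - points.getD (s.getD k 0) 0| ≤ epsilon))) := by
      rw [hpsl]
      apply List.countP_congr
      intro k hk
      have hkn : k + 1 < n := by simp [List.mem_range] at hk; omega
      have habs : |points.getD (s.getD (k + 1) 0) 0 - points.getD (s.getD k 0) 0|
          = ps.getD (k + 1) 0 - ps.getD k 0 := by
        rw [← hpt k (by omega), ← hpt (k + 1) hkn]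
        exact abs_of_nonneg (by have := hmono k hkn; omega)
      rw [habs]
      by_cases hle : ps.getD (k + 1) 0 - ps.getD k 0 ≤ epsilon
      · simp only [decide_eq_false (not_lt.mpr hle), decide_eq_true hle, Bool.not_true]
      · simp only [decide_eq_true (not_le.mp hle), decide_eq_false hle, Bool.not_false]
    rw [hcongr]
    have hnot : (List.range (n - 1)).countP
        (fun k => !(decide (|points.getD (s.getD (k + 1) 0) 0 - points.getD (s.getD k 0) 0| ≤ epsilon)))
        = (n - 1) - (List.range (n - 1)).countP
        (fun k => decide (|points.getD (s.getD (k + 1) 0) 0 - points.getD (s.getD k 0) 0| ≤ epsilon)) := by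
      have := List.length_eq_countP_add_countP
        (fun k => decide (|points.getD (s.getD (k + 1) 0) 0 - points.getD (s.getD k 0) 0| ≤ epsilon))
        (l := List.range (n - 1))
      simp only [List.length_range] at this
      have h2 : (List.range (n - 1)).countP
          (fun k => !(decide (|points.getD (s.getD (k + 1) 0) 0 - points.getD (s.getD k 0) 0| ≤ epsilon)))
          = (List.range (n - 1)).countP
          (fun a => decide ¬(decide (|points.getD (s.getD (a + 1) 0) 0 - points.getD (s.getD a 0) 0| ≤ epsilon) = true)) := by
        apply List.countP_congr
        intro a _
        simp
      omega
    rw [hnot]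
    have hcle : (List.range (n - 1)).countP
        (fun k => decide (|points.getD (s.getD (k + 1) 0) 0 - points.getD (s.getD k 0) 0| ≤ epsilon))
        ≤ n - 1 := by
      have := List.countP_le_length
        (p := fun k => decide (|points.getD (s.getD (k + 1) 0) 0 - points.getD (s.getD k 0) 0| ≤ epsilon))
        (l := List.range (n - 1))
      simpa using this
    have h1n : 1 ≤ n := hn
    rw [Nat.cast_sub hcle, Nat.cast_sub h1n]
    push_cast
    ring

-- ===== VERDICT (by name: the statement is the Claim_ definition above) =====
theorem beta0_spec : Claim_equal_beta0 := by
  intro points epsilon _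
  unfold Spec_beta0
  exact beta0_ab points epsilon
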